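-- pv_equiv track=rewrite | github.com/Widmerpool/Graceful-Trees | Budding.py | dbase
-- ===== SOURCE A (Python) =====
-- def factorial(n): # takes a number and gives back its factorial
--     if n<=1:
--         return 1
--     else:
--         return n*factorial(n-1)
--
-- def dbase(fb):# takes a factoradic representation of a number, and gives back the decimal form of the number.
--     size=len(fb)
--     db=0
--     s=0
--     s+=size-1
--     f=factorial(s)
--     while s != 0:
--         a=fb.pop(0)
--         db+=a*f
--         f=f//s
--         s=s-1
--     return db
-- ===== SOURCE B (Python) =====
-- def dbase(fb):  # factoradic -> decimal via Horner's scheme (no factorial helper).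
--     # Note: the original pops fb in place; this version leaves fb unchanged
--     # (return-value equivalence only).
--     v = 0
--     m = len(fb)
--     for x in fb[:-1]:
--         v = v * m + x
--         m -= 1
--     return v
-- ===== Notes on version B (the rewrite author's own statement) =====
-- stated objective: faster
-- what changed: Replaces the factorial helper plus the pop(0)/floor-division while-loop by a single Horner-scheme pass over fb[:-1] with a decreasing multiplier; B does not mutate fb (return-value equivalence only).
-- crash fix: On the empty list A raises IndexError (pop from empty list); B returns 0. — e.g. on dbase([]): A raises IndexError, B returns 0
import Mathlib
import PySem

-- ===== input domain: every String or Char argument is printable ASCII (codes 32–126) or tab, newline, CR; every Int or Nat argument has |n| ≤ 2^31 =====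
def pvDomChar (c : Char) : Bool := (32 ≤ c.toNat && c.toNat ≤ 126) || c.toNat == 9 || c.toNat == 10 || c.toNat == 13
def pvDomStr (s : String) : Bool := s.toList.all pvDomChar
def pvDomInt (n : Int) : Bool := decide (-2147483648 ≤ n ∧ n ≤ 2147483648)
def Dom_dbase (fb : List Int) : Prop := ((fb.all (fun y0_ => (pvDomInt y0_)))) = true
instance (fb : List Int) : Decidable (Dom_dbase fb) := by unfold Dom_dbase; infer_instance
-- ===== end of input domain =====

-- B replaces the factorial helper and the pop/floor-division loop by one Horner pass
-- over fb[:-1] (simpler); A mutates fb in place (pops all but the last element), B does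
-- not — the equivalence proved here is about the RETURN value only.

-- ===== PORT A =====
def factorialA (n : Int) : Int :=
  if n ≤ 1 then 1 else n * factorialA (n - 1)
termination_by n.toNat
decreasing_by omega

-- the while-loop of A; the '0 < s' guard only makes the recursion total:
-- from dbase, s = len(fb) - 1 ≥ 0 whenever the first pop succeeds, so the
-- 'else 0' branch is never reached on an input where A returns.
def dbaseLoop (fb : List Int) (db f s : Int) : Int :=
  if s = 0 then db
  else
    match PySem.List.pop? fb 0 with
    | none => 0  -- fb.pop(0) on an empty list: IndexError (excluded by Pre_)
    | some (a, rest) =>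
      if 0 < s then dbaseLoop rest (db + a * f) (PySem.Int.floordiv f s) (s - 1)
      else 0
termination_by s.toNat
decreasing_by omega

def dbase (fb : List Int) : Int :=
  let size : Int := fb.length
  let db : Int := 0
  let s : Int := 0 + (size - 1)
  let f : Int := factorialA s
  dbaseLoop fb db f s

-- ===== PORT B =====
def dbase_alt (fb : List Int) : Int :=
  let m0 : Int := fb.length
  ((PySem.List.slice fb none (some (-1))).foldl
      (fun (p : Int × Int) x => (p.1 * p.2 + x, p.2 - 1)) (0, m0)).1

-- ===== PRECONDITION & SPEC =====
-- Pre_ excludes only the empty list, on which A raises IndexError (pop from empty list).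
def Pre_dbase (fb : List Int) : Prop := fb ≠ []
instance (fb : List Int) : Decidable (Pre_dbase fb) := by unfold Pre_dbase; infer_instance
def pvWitness_dbase : List Int := ([3, 1, 0, 2])

-- On the empty list A raises IndexError (pop from empty list); B returns 0.
def Raises_dbase (fb : List Int) : Prop := fb = []
instance (fb : List Int) : Decidable (Raises_dbase fb) := by unfold Raises_dbase; infer_instance
def pvRaiseWitness_dbase : List Int := ([])
def pvRaiseWitnessOut_dbase : Int := 0

def Spec_dbase (fb : List Int) (out : Int) : Prop := out = dbase_alt fb
instance (fb : List Int) (out : Int) : Decidable (Spec_dbase fb out) := by unfold Spec_dbase; infer_instance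

-- ===== CLAIM (what is proved, stated in full; the proofs are below) =====
def Claim_equal_dbase : Prop := ∀ (fb : List Int), Dom_dbase fb → Pre_dbase fb → Spec_dbase fb (dbase fb)
def Claim_raises_dbase : Prop := (∀ (fb : List Int), Dom_dbase fb → Raises_dbase fb → ¬ Pre_dbase fb) ∧ (Dom_dbase (pvRaiseWitness_dbase) ∧ Raises_dbase (pvRaiseWitness_dbase) ∧ dbase_alt (pvRaiseWitness_dbase) = pvRaiseWitnessOut_dbase)

-- ===== LEMMAS AND PROOFS =====

-- factorial over Nat, the common spec currency
def pvFact : Nat → Int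
  | 0 => 1
  | n + 1 => (n + 1) * pvFact n

-- the factoradic value A and B both compute: element j of ys weighs (|ys| - j)!
def pvW : List Int → Int
  | [] => 0
  | a :: ys => a * pvFact (ys.length + 1) + pvW ys

theorem factorialA_nat (n : Nat) : factorialA (n : Int) = pvFact n := by
  induction n with
  | zero => simp [factorialA, pvFact]
  | succ k ih =>
    rw [factorialA]
    by_cases hk : k = 0
    · subst hk; norm_num [pvFact]
    · have h1 : ¬ ((k + 1 : Nat) : Int) ≤ 1 := by omega
      rw [if_neg h1]
      have h2 : ((k + 1 : Nat) : Int) - 1 = (k : Int) := by push_cast; ring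
      rw [h2, ih, pvFact]
      push_cast; ring

theorem fact_floordiv (k : Nat) :
    PySem.Int.floordiv (pvFact (k + 1)) ((k : Int) + 1) = pvFact k := by
  have hpos : (0 : Int) < (k : Int) + 1 := by omega
  rw [PySem.Int.floordiv_eq_ediv_of_pos hpos, pvFact]
  rw [Int.mul_ediv_cancel_left _ (by omega)]

theorem pvFact_succ (n : Nat) : pvFact (n + 1) = ((n : Int) + 1) * pvFact n := by
  simp [pvFact]

theorem dbaseLoop_spec (xs : List Int) :
    ∀ db : Int, xs ≠ [] →
      dbaseLoop xs db (pvFact (xs.length - 1)) ((xs.length : Int) - 1) = db + pvW xs.dropLast := by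
  induction xs with
  | nil => intro db h; exact absurd rfl h
  | cons a rest ih =>
    intro db _
    rw [dbaseLoop]
    cases rest with
    | nil => simp [pvW]
    | cons b t =>
      have hlen : ((a :: b :: t).length : Int) - 1 = ((b :: t).length : Int) := by
        push_cast [List.length_cons]; ring
      have hne : ((a :: b :: t).length : Int) - 1 ≠ 0 := by
        rw [hlen]; push_cast [List.length_cons]; omega
      have hpos : (0 : Int) < ((a :: b :: t).length : Int) - 1 := by
        rw [hlen]; push_cast [List.length_cons]; omega
      rw [if_neg hne, PySem.List.pop?_zero_cons a (b :: t)]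
      simp only [if_pos hpos]
      have hL1 : (a :: b :: t).length - 1 = t.length + 1 := by simp
      have hL2 : ((b :: t).length : Int) = (t.length : Int) + 1 := by push_cast [List.length_cons]; ring
      have hfd : PySem.Int.floordiv (pvFact ((a :: b :: t).length - 1)) (((a :: b :: t).length : Int) - 1)
          = pvFact ((b :: t).length - 1) := by
        rw [hL1, hlen, hL2]
        simpa using fact_floordiv t.length
      have hstep : ((a :: b :: t).length : Int) - 1 - 1 = ((b :: t).length : Int) - 1 := by
        rw [hlen, hL2]
      rw [hfd, hstep, ih (db + a * pvFact ((a :: b :: t).length - 1)) (by simp)]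
      have hdrop : (a :: b :: t).dropLast = a :: (b :: t).dropLast := rfl
      rw [hdrop, pvW]
      have hdl : (b :: t).dropLast.length + 1 = (a :: b :: t).length - 1 := by
        simp [List.length_dropLast]
      rw [hdl]; ring

theorem foldlB_spec (ys : List Int) :
    ∀ v : Int,
      (ys.foldl (fun (p : Int × Int) x => (p.1 * p.2 + x, p.2 - 1)) (v, (ys.length : Int) + 1)).1
        = v * pvFact (ys.length + 1) + pvW ys := by
  induction ys with
  | nil => intro v; simp [pvFact, pvW]
  | cons x t ih =>
    intro v
    rw [List.foldl_cons]
    have h1 : ((x :: t).length : Int) + 1 - 1 = (t.length : Int) + 1 := by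
      push_cast [List.length_cons]; ring
    have h2 : (v * (((x :: t).length : Int) + 1) + x, ((x :: t).length : Int) + 1 - 1)
        = (v * (((x :: t).length : Int) + 1) + x, (t.length : Int) + 1) := by rw [h1]
    rw [h2, ih (v * (((x :: t).length : Int) + 1) + x)]
    have h3 : (x :: t).length + 1 = t.length + 1 + 1 := by simp
    rw [h3]
    simp only [pvW, pvFact_succ]
    push_cast [List.length_cons]; ring

theorem dbase_alt_eq_pvW (fb : List Int) (h : fb ≠ []) :
    dbase_alt fb = pvW fb.dropLast := by
  unfold dbase_alt
  rw [PySem.List.slice_to_neg_one]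
  have hlen : (fb.length : Int) = (fb.dropLast.length : Int) + 1 := by
    have hd : fb.dropLast.length = fb.length - 1 := List.length_dropLast
    have hpos : 0 < fb.length := List.length_pos_iff.mpr h
    omega
  rw [hlen, foldlB_spec fb.dropLast 0]
  ring

-- ===== VERDICT (by name: the statement is the Claim_ definition above) =====
theorem dbase_spec : Claim_equal_dbase := by
  intro fb _ hpre
  unfold Spec_dbase
  show dbaseLoop fb 0 (factorialA (0 + ((fb.length : Int) - 1))) (0 + ((fb.length : Int) - 1))
      = dbase_alt fb
  have hpos : 0 < fb.length := List.length_pos_iff.mpr hpre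
  have h1 : (0 : Int) + ((fb.length : Int) - 1) = ((fb.length - 1 : Nat) : Int) := by omega
  rw [h1, factorialA_nat]
  have h2 : ((fb.length - 1 : Nat) : Int) = (fb.length : Int) - 1 := by omega
  rw [h2, dbaseLoop_spec fb 0 hpre, dbase_alt_eq_pvW fb hpre]
  omega

@[simp] theorem dbase_raises : Claim_raises_dbase := by
  unfold Claim_raises_dbase
  exact ⟨fun fb _ h => by simp [Raises_dbase] at h; simp [Pre_dbase, h], by decide⟩
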